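-- pv_equiv track=rewrite | github.com/wzlzju/anonymous1-202407 | code/testgraphon/graphonalignment/src/code/interlayer.py | linkingLists_oneall2manyall
-- ===== SOURCE A (Python) =====
-- def linkingLists_oneall2manyall(l1, l2):
--     if len(l1) < len(l2):
--         g0 = l1
--         g1 = l2
--         rev = False
--     else:
--         g1 = l1
--         g0 = l2
--         rev = True
--
--     rate = len(g1)/len(g0)
--     links = []
--     linksr = []
--     j = 0
--     for i,vi in enumerate(g0):
--         if i == len(g0)-1:
--             nj = len(g1)
--         else:
--             nj = int((i+1)*rate)
--         for cj in range(j, nj):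
--             links.append((vi, g1[cj]) if not rev else (g1[cj], vi))
--             linksr.append((vi, g1[cj]) if rev else (g1[cj], vi))
--         j = nj
--
--     return links, linksr
-- ===== SOURCE B (Python) =====
-- def linkingLists_oneall2manyall(l1, l2):
--     if len(l1) < len(l2):
--         g0, g1, rev = l1, l2, False
--     else:
--         g0, g1, rev = l2, l1, True
--     rate = len(g1) / len(g0)
--     n = len(g0)
--     links = []
--     linksr = []
--     i = 0
--     for cj, w in enumerate(g1):
--         while i < n - 1 and cj >= int((i + 1) * rate):
--             i += 1
--         v = g0[i]
--         links.append((w, v) if rev else (v, w))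
--         linksr.append((v, w) if rev else (w, v))
--     return links, linksr
-- ===== Notes on version B (the rewrite author's own statement) =====
-- stated objective: alternative
-- what changed: A iterates over the short list with nested loops (outer per short-list element, inner over its chunk of the long list, threading the chunk-start cursor j); B makes a single forward pass over the long list, advancing a pointer into the short list with a while-loop at each step and emitting one pair into each output list per long-list element.
import Mathlib
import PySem

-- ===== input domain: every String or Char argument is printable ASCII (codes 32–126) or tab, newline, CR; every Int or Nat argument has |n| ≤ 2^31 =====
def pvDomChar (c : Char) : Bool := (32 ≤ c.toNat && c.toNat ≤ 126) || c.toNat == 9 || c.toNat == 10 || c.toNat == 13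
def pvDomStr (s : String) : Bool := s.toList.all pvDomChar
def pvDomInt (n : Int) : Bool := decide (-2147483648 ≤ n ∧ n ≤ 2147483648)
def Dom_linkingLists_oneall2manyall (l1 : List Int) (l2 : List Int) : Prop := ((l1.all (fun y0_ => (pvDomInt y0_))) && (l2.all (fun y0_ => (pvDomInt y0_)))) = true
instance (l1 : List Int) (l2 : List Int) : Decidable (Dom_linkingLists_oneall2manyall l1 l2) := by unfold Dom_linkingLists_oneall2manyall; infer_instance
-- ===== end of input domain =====

-- B replaces A's nested per-chunk loops (outer over the short list, inner over a chunk
-- of the long list, with a threaded chunk-start cursor) by a single forward pass over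
-- the LONG list with a moving pointer into the short list, emitting both output lists
-- one pair at a time (objective: alternative decomposition, not faster).

-- ===== PORT A =====
-- Shared model of CPython's IEEE-754 double arithmetic (both Pythons compute
-- rate = m/n and int(k*rate) with floats): round-half-even to a 53-bit significand.
-- Exact for the normal, non-overflowing range, which covers every reachable value here.
def pvRHE (x : ℚ) : ℤ :=
  if x - (⌊x⌋ : ℚ) < 1/2 then ⌊x⌋
  else if 1/2 < x - (⌊x⌋ : ℚ) then ⌊x⌋ + 1
  else if ⌊x⌋ % 2 = 0 then ⌊x⌋ else ⌊x⌋ + 1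

def pvDRound (q : ℚ) : ℚ :=
  if q = 0 then 0
  else
    let e : ℤ := Int.log 2 |q|
    (pvRHE (q * (2:ℚ) ^ (52 - e)) : ℚ) * (2:ℚ) ^ (e - 52)

-- Python's int(x) truncates toward zero.
def pvTrunc (x : ℚ) : ℤ := if 0 ≤ x then ⌊x⌋ else -⌊-x⌋

-- g1[cj] / g0[i]; the index is in range on every input either Python returns on.
def pvIdx (xs : List Int) (c : ℤ) : Int := (PySem.List.pyGet? xs c).getD 0

def linkingLists_oneall2manyall (l1 : List Int) (l2 : List Int) : (List (Int × Int)) × (List (Int × Int)) :=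
  let g0 := if l1.length < l2.length then l1 else l2
  let g1 := if l1.length < l2.length then l2 else l1
  let rev : Bool := !(decide (l1.length < l2.length))
  let rate := pvDRound ((g1.length : ℚ) / (g0.length : ℚ))
  let res := (PySem.List.enumerate g0).foldl (fun st p =>
      let nj : ℤ := if p.1 = (g0.length : ℤ) - 1 then (g1.length : ℤ)
                    else pvTrunc (pvDRound (pvDRound ((p.1 : ℚ) + 1) * rate))
      (st.1 ++ (PySem.List.pyRange st.2.2 nj 1).map
          (fun cj => if !rev then (p.2, pvIdx g1 cj) else (pvIdx g1 cj, p.2)),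
       st.2.1 ++ (PySem.List.pyRange st.2.2 nj 1).map
          (fun cj => if rev then (p.2, pvIdx g1 cj) else (pvIdx g1 cj, p.2)),
       nj)) (([] : List (Int × Int)), ([] : List (Int × Int)), (0 : ℤ))
  (res.1, res.2.1)

-- ===== PORT B =====
-- B's while-loop 'while i < n-1 and cj >= int((i+1)*rate): i += 1'; the fuel
-- (n-1-i).toNat counts exactly the remaining admissible increments, so fuel > 0 ↔ i < n-1.
def pvAdv (bnd : ℤ → ℤ) (cj : ℤ) : ℕ → ℤ → ℤ
  | 0, p => p
  | fuel + 1, p => if bnd (p + 1) ≤ cj then pvAdv bnd cj fuel (p + 1) else p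

def linkingLists_oneall2manyall_alt (l1 : List Int) (l2 : List Int) : (List (Int × Int)) × (List (Int × Int)) :=
  let g0 := if l1.length < l2.length then l1 else l2
  let g1 := if l1.length < l2.length then l2 else l1
  let rev : Bool := !(decide (l1.length < l2.length))
  let n : ℤ := (g0.length : ℤ)
  let rate := pvDRound ((g1.length : ℚ) / (g0.length : ℚ))
  let res := (PySem.List.enumerate g1).foldl (fun st q =>
      let p := pvAdv (fun k => pvTrunc (pvDRound (pvDRound (k : ℚ) * rate))) q.1
                 ((n - 1 - st.2.2).toNat) st.2.2
      let v := pvIdx g0 p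
      (st.1 ++ [if rev then (q.2, v) else (v, q.2)],
       st.2.1 ++ [if rev then (v, q.2) else (q.2, v)],
       p)) (([] : List (Int × Int)), ([] : List (Int × Int)), (0 : ℤ))
  (res.1, res.2.1)

-- ===== PRECONDITION & SPEC =====
-- Pre_ excludes (a) inputs where either list is empty — the smaller list g0 is then
-- empty and Python A raises ZeroDivisionError on rate = len(g1)/len(g0) (B too) — and
-- (b) inputs where float rounding pushes the last intermediate chunk boundary
-- int((n-1)*rate) past len(g1), where Python A raises IndexError on g1[cj]; (b) is
-- unreachable for physically realizable list lengths (it needs lengths around 2^52).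
def Pre_linkingLists_oneall2manyall (l1 : List Int) (l2 : List Int) : Prop :=
  l1 ≠ [] ∧ l2 ≠ [] ∧
  (((min l1.length l2.length : ℕ) : ℤ) ≤ 1 ∨
    pvTrunc (pvDRound (pvDRound (((((min l1.length l2.length : ℕ) : ℤ)) - 1 : ℤ) : ℚ) *
        pvDRound (((max l1.length l2.length : ℕ) : ℚ) / ((min l1.length l2.length : ℕ) : ℚ))))
      ≤ ((max l1.length l2.length : ℕ) : ℤ))
instance (l1 : List Int) (l2 : List Int) : Decidable (Pre_linkingLists_oneall2manyall l1 l2) := by unfold Pre_linkingLists_oneall2manyall; infer_instance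
def pvWitness_linkingLists_oneall2manyall : List Int × List Int := ([1], [2, 3, 4])

def Spec_linkingLists_oneall2manyall (l1 : List Int) (l2 : List Int) (out : (List (Int × Int)) × (List (Int × Int))) : Prop := out = linkingLists_oneall2manyall_alt l1 l2
instance (l1 : List Int) (l2 : List Int) (out : (List (Int × Int)) × (List (Int × Int))) : Decidable (Spec_linkingLists_oneall2manyall l1 l2 out) := by unfold Spec_linkingLists_oneall2manyall; infer_instance

-- ===== CLAIM (what is proved, stated in full; the proofs are below) =====
def Claim_equal_linkingLists_oneall2manyall : Prop := ∀ (l1 : List Int) (l2 : List Int), Dom_linkingLists_oneall2manyall l1 l2 → Pre_linkingLists_oneall2manyall l1 l2 → Spec_linkingLists_oneall2manyall l1 l2 (linkingLists_oneall2manyall l1 l2)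

-- ===== LEMMAS AND PROOFS =====

-- ---- the float model: basic bounds and monotonicity ----
lemma pvRHE_le (x : ℚ) : (pvRHE x : ℚ) ≤ x + 1/2 := by
  unfold pvRHE
  split_ifs with h1 h2 h3 <;> push_cast <;>
    linarith [Int.floor_le x, Int.lt_floor_add_one x]

lemma le_pvRHE (x : ℚ) : x - 1/2 ≤ (pvRHE x : ℚ) := by
  unfold pvRHE
  split_ifs with h1 h2 h3 <;> push_cast <;>
    linarith [Int.floor_le x, Int.lt_floor_add_one x]

lemma pvRHE_mono {x y : ℚ} (h : x ≤ y) : pvRHE x ≤ pvRHE y := by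
  have hf : ⌊x⌋ ≤ ⌊y⌋ := Int.floor_mono h
  by_cases heq : ⌊x⌋ = ⌊y⌋
  · unfold pvRHE
    rw [← heq]
    split_ifs <;> first | omega | linarith
  · have hlt : ⌊x⌋ < ⌊y⌋ := lt_of_le_of_ne hf heq
    have h1 : pvRHE x ≤ ⌊x⌋ + 1 := by unfold pvRHE; split_ifs <;> omega
    have h2 : ⌊y⌋ ≤ pvRHE y := by unfold pvRHE; split_ifs <;> omega
    omega

lemma pvTrunc_mono {x y : ℚ} (h : x ≤ y) : pvTrunc x ≤ pvTrunc y := by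
  unfold pvTrunc
  split_ifs with hx hy hy
  · exact Int.floor_mono h
  · linarith
  · have h1 : 0 ≤ ⌊-x⌋ := Int.floor_nonneg.mpr (by linarith)
    have h2 : 0 ≤ ⌊y⌋ := Int.floor_nonneg.mpr hy
    omega
  · have := Int.floor_mono (show -y ≤ -x by linarith)
    omega

lemma pvTrunc_nonneg {x : ℚ} (h : 0 ≤ x) : 0 ≤ pvTrunc x := by
  unfold pvTrunc
  rw [if_pos h]
  exact Int.floor_nonneg.mpr h

lemma pvDRound_zero : pvDRound 0 = 0 := by simp [pvDRound]

lemma pvDRound_ge {x : ℚ} (hx : 0 < x) : (2:ℚ) ^ (Int.log 2 x) ≤ pvDRound x := by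
  unfold pvDRound
  rw [if_neg hx.ne', abs_of_pos hx]
  set e := Int.log 2 x with he
  set z := x * (2:ℚ) ^ (52 - e) with hzdef
  have h1 : (2:ℚ) ^ e ≤ x := Int.zpow_log_le_self (by norm_num) hx
  have hpow : (0:ℚ) < (2:ℚ) ^ (52 - e) := zpow_pos (by norm_num) _
  have hz : (2:ℚ) ^ (52:ℤ) ≤ z := by
    have hsplit : (2:ℚ) ^ (52:ℤ) = (2:ℚ) ^ e * (2:ℚ) ^ (52 - e) := by
      rw [← zpow_add₀ (by norm_num : (2:ℚ) ≠ 0)]; congr 1; ring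
    rw [hzdef, hsplit]; nlinarith
  have h52 : ((2:ℚ) ^ (52:ℤ)) = (4503599627370496 : ℚ) := by norm_num
  have hint : (4503599627370496 : ℤ) ≤ pvRHE z := by
    have hb := le_pvRHE z
    by_contra hcon
    have hcon' : pvRHE z ≤ 4503599627370495 := by omega
    have : (pvRHE z : ℚ) ≤ (4503599627370495 : ℚ) := by exact_mod_cast hcon'
    linarith
  have hfinal : (4503599627370496 : ℚ) ≤ (pvRHE z : ℚ) := by exact_mod_cast hint
  calc (2:ℚ) ^ e = (2:ℚ) ^ (52:ℤ) * (2:ℚ) ^ (e - 52) := by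
        rw [← zpow_add₀ (by norm_num : (2:ℚ) ≠ 0)]; congr 1; ring
    _ ≤ (pvRHE z : ℚ) * (2:ℚ) ^ (e - 52) := by
        have h2 : (0:ℚ) < (2:ℚ) ^ (e - 52) := zpow_pos (by norm_num) _
        nlinarith

lemma pvDRound_le {x : ℚ} (hx : 0 < x) : pvDRound x ≤ (2:ℚ) ^ (Int.log 2 x + 1) := by
  unfold pvDRound
  rw [if_neg hx.ne', abs_of_pos hx]
  set e := Int.log 2 x with he
  set z := x * (2:ℚ) ^ (52 - e) with hzdef
  have h1 : x < (2:ℚ) ^ (e + 1) := Int.lt_zpow_succ_log_self (by norm_num) x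
  have hpow : (0:ℚ) < (2:ℚ) ^ (52 - e) := zpow_pos (by norm_num) _
  have hz : z < (2:ℚ) ^ (53:ℤ) := by
    have hsplit : (2:ℚ) ^ (53:ℤ) = (2:ℚ) ^ (e + 1) * (2:ℚ) ^ (52 - e) := by
      rw [← zpow_add₀ (by norm_num : (2:ℚ) ≠ 0)]; congr 1; ring
    rw [hzdef, hsplit]; nlinarith
  have h53 : ((2:ℚ) ^ (53:ℤ)) = (9007199254740992 : ℚ) := by norm_num
  have hint : pvRHE z ≤ (9007199254740992 : ℤ) := by
    have hb := pvRHE_le z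
    by_contra hcon
    have hcon' : (9007199254740993 : ℤ) ≤ pvRHE z := by omega
    have : (9007199254740993 : ℚ) ≤ (pvRHE z : ℚ) := by exact_mod_cast hcon'
    linarith
  have hfinal : (pvRHE z : ℚ) ≤ (9007199254740992 : ℚ) := by exact_mod_cast hint
  calc (pvRHE z : ℚ) * (2:ℚ) ^ (e - 52)
      ≤ (9007199254740992 : ℚ) * (2:ℚ) ^ (e - 52) := by
        have h2 : (0:ℚ) < (2:ℚ) ^ (e - 52) := zpow_pos (by norm_num) _
        nlinarith
    _ = (2:ℚ) ^ (e + 1) := by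
        rw [← h53, ← zpow_add₀ (by norm_num : (2:ℚ) ≠ 0)]; congr 1; ring

lemma pvDRound_nonneg {x : ℚ} (h : 0 ≤ x) : 0 ≤ pvDRound x := by
  rcases eq_or_lt_of_le h with h0 | h0
  · rw [← h0, pvDRound_zero]
  · exact le_trans (zpow_pos (by norm_num : (0:ℚ) < 2) _).le (pvDRound_ge h0)

lemma pvDRound_mono {x y : ℚ} (h0 : 0 ≤ x) (h : x ≤ y) : pvDRound x ≤ pvDRound y := by
  rcases eq_or_lt_of_le h0 with hx0 | hx0
  · rw [← hx0, pvDRound_zero]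
    exact pvDRound_nonneg (by linarith)
  · have hy0 : 0 < y := lt_of_lt_of_le hx0 h
    have hlog : Int.log 2 x ≤ Int.log 2 y := Int.log_mono_right hx0 h
    rcases eq_or_lt_of_le hlog with heq | hlt
    · unfold pvDRound
      rw [if_neg hx0.ne', if_neg hy0.ne', abs_of_pos hx0, abs_of_pos hy0, ← heq]
      have hs : (0:ℚ) < (2:ℚ) ^ (52 - Int.log 2 x) := zpow_pos (by norm_num) _
      have hm : pvRHE (x * (2:ℚ) ^ (52 - Int.log 2 x)) ≤ pvRHE (y * (2:ℚ) ^ (52 - Int.log 2 x)) :=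
        pvRHE_mono (by nlinarith)
      have hs2 : (0:ℚ) < (2:ℚ) ^ (Int.log 2 x - 52) := zpow_pos (by norm_num) _
      have : (pvRHE (x * (2:ℚ) ^ (52 - Int.log 2 x)) : ℚ)
          ≤ (pvRHE (y * (2:ℚ) ^ (52 - Int.log 2 x)) : ℚ) := by exact_mod_cast hm
      nlinarith
    · calc pvDRound x ≤ (2:ℚ) ^ (Int.log 2 x + 1) := pvDRound_le hx0
        _ ≤ (2:ℚ) ^ (Int.log 2 y) := by
            apply zpow_le_zpow_right₀ (by norm_num : (1:ℚ) ≤ 2)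
            omega
        _ ≤ pvDRound y := pvDRound_ge hy0

-- ---- chunk boundaries ----
-- bRaw k = int(k * rate), the boundary formula shared by both Pythons
def pvB (rate : ℚ) (k : ℤ) : ℤ := pvTrunc (pvDRound (pvDRound (k : ℚ) * rate))

-- G extends it by G 0 = 0 and G n = m (the loops' virtual first / last boundaries)
def pvG (rate : ℚ) (n m k : ℤ) : ℤ := if k ≤ 0 then 0 else if k < n then pvB rate k else m

lemma pvB_nonneg {rate : ℚ} (hr : 0 ≤ rate) {k : ℤ} (h0 : 0 ≤ k) : 0 ≤ pvB rate k :=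
  pvTrunc_nonneg (pvDRound_nonneg (mul_nonneg (pvDRound_nonneg (by exact_mod_cast h0)) hr))

lemma pvB_mono {rate : ℚ} (hr : 0 ≤ rate) {k l : ℤ} (h0 : 0 ≤ k) (h : k ≤ l) :
    pvB rate k ≤ pvB rate l := by
  have h1 : pvDRound (k : ℚ) ≤ pvDRound (l : ℚ) :=
    pvDRound_mono (by exact_mod_cast h0) (by exact_mod_cast h)
  have h2 : (0:ℚ) ≤ pvDRound (k : ℚ) := pvDRound_nonneg (by exact_mod_cast h0)
  exact pvTrunc_mono (pvDRound_mono (mul_nonneg h2 hr) (by nlinarith))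

lemma pvG_mono {rate : ℚ} {n m : ℤ} (hr : 0 ≤ rate) (hn : 1 ≤ n) (hm : 0 ≤ m)
    (hlast : n ≤ 1 ∨ pvB rate (n - 1) ≤ m) {k l : ℤ}
    (h0 : 0 ≤ k) (h : k ≤ l) (hl : l ≤ n) : pvG rate n m k ≤ pvG rate n m l := by
  have hkm : ∀ j : ℤ, 0 < j → j < n → pvB rate j ≤ m := by
    intro j hj1 hj2
    rcases hlast with hc | hc
    · omega
    · exact le_trans (pvB_mono hr (by omega) (by omega)) hc
  unfold pvG
  split_ifs with a1 a2 b1 b2 <;> first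
    | rfl
    | omega
    | exact hm
    | exact pvB_nonneg hr (by omega)
    | exact pvB_mono hr (by omega) h
    | exact hkm k (by omega) (by omega)

-- ---- the bucket count: number of interior boundaries ≤ cj ----
def pvCnt (G : ℤ → ℤ) (nm1 : ℕ) (cj : ℤ) : ℤ :=
  (((List.range nm1).filter (fun k : ℕ => decide (G ((k : ℤ) + 1) ≤ cj))).length : ℤ)

lemma pvCnt_nonneg (G : ℤ → ℤ) (nm1 : ℕ) (cj : ℤ) : 0 ≤ pvCnt G nm1 cj :=
  Int.natCast_nonneg _

lemma pvCnt_le (G : ℤ → ℤ) (nm1 : ℕ) (cj : ℤ) : pvCnt G nm1 cj ≤ (nm1 : ℤ) := by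
  unfold pvCnt
  exact_mod_cast le_trans (List.length_filter_le _ _) (le_of_eq (List.length_range))

lemma pvCnt_ge (G : ℤ → ℤ) (nm1 : ℕ) (cj : ℤ)
    (hmono : ∀ k l : ℤ, 1 ≤ k → k ≤ l → l ≤ (nm1 : ℤ) → G k ≤ G l)
    {p : ℤ} (h0 : 0 ≤ p) (hp : p < (nm1 : ℤ)) (hle : G (p + 1) ≤ cj) :
    p + 1 ≤ pvCnt G nm1 cj := by
  unfold pvCnt
  set pn := p.toNat with hpn
  have hp' : (pn : ℤ) = p := Int.toNat_of_nonneg h0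
  have hsplit : nm1 = (pn + 1) + (nm1 - (pn + 1)) := by omega
  rw [hsplit, List.range_add, List.filter_append, List.length_append]
  have hall : (List.range (pn + 1)).filter (fun k : ℕ => decide (G ((k : ℤ) + 1) ≤ cj))
      = List.range (pn + 1) := by
    apply List.filter_eq_self.mpr
    intro k hk
    have hk' : k < pn + 1 := List.mem_range.mp hk
    simp only [decide_eq_true_eq]
    exact le_trans (hmono ((k : ℤ) + 1) (p + 1) (by omega) (by omega) (by omega)) hle
  rw [hall, List.length_range]
  omega

lemma pvCnt_le_of_lt (G : ℤ → ℤ) (nm1 : ℕ) (cj : ℤ)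
    (hmono : ∀ k l : ℤ, 1 ≤ k → k ≤ l → l ≤ (nm1 : ℤ) → G k ≤ G l)
    {p : ℤ} (h0 : 0 ≤ p) (hgt : cj < G (p + 1)) : pvCnt G nm1 cj ≤ p := by
  by_cases hp : (nm1 : ℤ) ≤ p
  · exact le_trans (pvCnt_le G nm1 cj) hp
  · unfold pvCnt
    set pn := p.toNat with hpn
    have hp' : (pn : ℤ) = p := Int.toNat_of_nonneg h0
    set l := (List.range nm1).filter (fun k : ℕ => decide (G ((k : ℤ) + 1) ≤ cj)) with hl
    have hmem : ∀ k ∈ l, k < pn := by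
      intro k hk
      rw [hl, List.mem_filter] at hk
      obtain ⟨hk1, hk2⟩ := hk
      have hk1' : k < nm1 := List.mem_range.mp hk1
      simp only [decide_eq_true_eq] at hk2
      by_contra hc
      have : G (p + 1) ≤ G ((k : ℤ) + 1) := hmono (p + 1) ((k : ℤ) + 1) (by omega) (by omega) (by omega)
      omega
    have hnd : l.Nodup := (List.nodup_range).filter _
    have hcard : l.length ≤ pn := by
      have h1 : l.toFinset.card = l.length := List.toFinset_card_of_nodup hnd
      have h2 : l.toFinset ⊆ Finset.range pn := by
        intro k hk
        rw [List.mem_toFinset] at hk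
        exact Finset.mem_range.mpr (hmem k hk)
      have := Finset.card_le_card h2
      rw [h1, Finset.card_range] at this
      exact this
    omega

lemma pvCnt_mono (G : ℤ → ℤ) (nm1 : ℕ) {c c' : ℤ} (h : c ≤ c') :
    pvCnt G nm1 c ≤ pvCnt G nm1 c' := by
  unfold pvCnt
  have : ∀ xs : List ℕ,
      (xs.filter (fun k : ℕ => decide (G ((k : ℤ) + 1) ≤ c))).length
        ≤ (xs.filter (fun k : ℕ => decide (G ((k : ℤ) + 1) ≤ c'))).length := by
    intro xs
    induction xs with
    | nil => simp
    | cons x xs ih =>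
        simp only [List.filter_cons]
        split_ifs with h1 h2 h2 <;> simp_all <;> omega
  exact_mod_cast this (List.range nm1)

lemma pvCnt_bucket (G : ℤ → ℤ) (nm1 : ℕ) (cj : ℤ)
    (hmono : ∀ k l : ℤ, 1 ≤ k → k ≤ l → l ≤ (nm1 : ℤ) → G k ≤ G l)
    {i : ℤ} (h0 : 0 ≤ i) (hle : i ≤ (nm1 : ℤ))
    (hlow : i = 0 ∨ G i ≤ cj) (hhigh : i = (nm1 : ℤ) ∨ cj < G (i + 1)) :
    pvCnt G nm1 cj = i := by
  apply le_antisymm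
  · rcases hhigh with hc | hc
    · rw [hc]; exact pvCnt_le G nm1 cj
    · exact pvCnt_le_of_lt G nm1 cj hmono h0 hc
  · rcases hlow with hc | hc
    · rw [hc]; exact pvCnt_nonneg G nm1 cj
    · by_cases hi0 : i = 0
      · rw [hi0]; exact pvCnt_nonneg G nm1 cj
      · have := pvCnt_ge G nm1 cj hmono (p := i - 1) (by omega) (by omega)
          (by rwa [show i - 1 + 1 = i by omega])
        omega

-- ---- B's while loop reaches exactly the bucket of cj ----
lemma pvAdv_spec (bnd G : ℤ → ℤ) (nm1 : ℕ) (cj : ℤ)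
    (hagree : ∀ k : ℤ, 1 ≤ k → k ≤ (nm1 : ℤ) → bnd k = G k)
    (hmono : ∀ k l : ℤ, 1 ≤ k → k ≤ l → l ≤ (nm1 : ℤ) → G k ≤ G l) :
    ∀ (fuel : ℕ) (p : ℤ), 0 ≤ p → p ≤ (nm1 : ℤ) → fuel = ((nm1 : ℤ) - p).toNat →
      pvAdv bnd cj fuel p = max p (pvCnt G nm1 cj) := by
  intro fuel
  induction fuel with
  | zero =>
      intro p h0 hle hf
      have : p = (nm1 : ℤ) := by omega
      rw [pvAdv, max_eq_left (by rw [this]; exact pvCnt_le G nm1 cj)]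
  | succ f ih =>
      intro p h0 hle hf
      have hplt : p < (nm1 : ℤ) := by omega
      rw [pvAdv]
      by_cases hc : bnd (p + 1) ≤ cj
      · rw [if_pos hc]
        have hG : G (p + 1) ≤ cj := by
          rw [← hagree (p + 1) (by omega) (by omega)]; exact hc
        have hcnt : p + 1 ≤ pvCnt G nm1 cj := pvCnt_ge G nm1 cj hmono h0 hplt hG
        rw [ih (p + 1) (by omega) (by omega) (by omega)]
        rw [max_eq_right hcnt, max_eq_right (by omega)]
      · rw [if_neg hc]
        have hG : cj < G (p + 1) := by
          rw [← hagree (p + 1) (by omega) (by omega)]; omega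
        exact (max_eq_left (pvCnt_le_of_lt G nm1 cj hmono h0 hG)).symm

-- ---- A's nested loops in chunk form ----
def pvChunks (F : ℤ → ℤ) : List Int → ℤ → ℤ → List (Int × ℤ)
  | [], _, _ => []
  | v :: vs, i, j =>
      (PySem.List.pyRange j (F i) 1).map (fun c => (v, c)) ++ pvChunks F vs (i + 1) (F i)

def pvLastJ (F : ℤ → ℤ) : List Int → ℤ → ℤ → ℤ
  | [], _, j => j
  | _ :: vs, i, _ => pvLastJ F vs (i + 1) (F i)

lemma pv_fold_spec (F : ℤ → ℤ) (P Q : Int → ℤ → Int × Int) :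
    ∀ (vs : List Int) (i : ℤ) (j : ℤ) (L R : List (Int × Int)),
      (PySem.List.enumerate vs i).foldl (fun st p =>
        (st.1 ++ (PySem.List.pyRange st.2.2 (F p.1) 1).map (fun c => P p.2 c),
         st.2.1 ++ (PySem.List.pyRange st.2.2 (F p.1) 1).map (fun c => Q p.2 c),
         F p.1)) (L, R, j)
      = (L ++ (pvChunks F vs i j).map (fun t => P t.1 t.2),
         R ++ (pvChunks F vs i j).map (fun t => Q t.1 t.2),
         pvLastJ F vs i j) := by
  intro vs
  induction vs with
  | nil => intro i j L R; simp [PySem.List.enumerate, pvChunks, pvLastJ]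
  | cons v vs ih =>
      intro i j L R
      simp only [PySem.List.enumerate_cons, List.foldl_cons, pvChunks, pvLastJ, ih,
        List.map_append, List.map_map, List.append_assoc]
      rfl

-- the chunks, flattened, are exactly the bucketed pairs over all of [0, m)
lemma pv_chunks_eq (g0 : List Int) (F G : ℤ → ℤ) (m : ℤ) (nm1 : ℕ)
    (hFG : ∀ i : ℤ, 0 ≤ i → i ≤ (nm1 : ℤ) → F i = G (i + 1))
    (hmono : ∀ k l : ℤ, 0 ≤ k → k ≤ l → l ≤ (nm1 : ℤ) + 1 → G k ≤ G l)
    (hmono' : ∀ k l : ℤ, 1 ≤ k → k ≤ l → l ≤ (nm1 : ℤ) → G k ≤ G l)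
    (hGn : G ((nm1 : ℤ) + 1) = m) :
    ∀ (vs : List Int) (i : ℤ), 0 ≤ i → i + vs.length = (nm1 : ℤ) + 1 →
      vs = g0.drop i.toNat →
      pvChunks F vs i (G i)
        = (PySem.List.pyRange (G i) m 1).map (fun cj => (pvIdx g0 (pvCnt G nm1 cj), cj)) := by
  intro vs
  induction vs with
  | nil =>
      intro i h0 hlen hdrop
      have : i = (nm1 : ℤ) + 1 := by simpa using hlen
      rw [pvChunks, this, hGn, PySem.List.pyRange_one_eq_nil le_rfl, List.map_nil]
  | cons v vs ih =>
      intro i h0 hlen hdrop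
      have hile : i ≤ (nm1 : ℤ) := by
        have := vs.length
        simp only [List.length_cons] at hlen
        omega
      have hFi : F i = G (i + 1) := hFG i h0 hile
      have hdrop' : vs = g0.drop (i + 1).toNat := by
        have h2 : (i + 1).toNat = i.toNat + 1 := by omega
        rw [h2, ← List.tail_drop, ← hdrop]
        rfl
      have hv : pvIdx g0 i = v := by
        have h1 : g0[i.toNat + 0]? = some v := by
          rw [← List.getElem?_drop, ← hdrop]
          rfl
        unfold pvIdx
        rw [PySem.List.pyGet?_of_nonneg g0 h0]
        simp only [Nat.add_zero] at h1
        rw [h1]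
        rfl
      have htail := ih (i + 1) (by omega)
        (by simp only [List.length_cons] at hlen; omega) hdrop'
      rw [pvChunks, hFi, htail]
      have hhead : (PySem.List.pyRange (G i) (G (i + 1)) 1).map (fun c => (v, c))
          = (PySem.List.pyRange (G i) (G (i + 1)) 1).map
              (fun cj => (pvIdx g0 (pvCnt G nm1 cj), cj)) := by
        apply List.map_congr_left
        intro c hc
        obtain ⟨hc1, hc2⟩ := (PySem.List.mem_pyRange_one).mp hc
        have hcnt : pvCnt G nm1 c = i := by
          apply pvCnt_bucket G nm1 c hmono' h0 hile
          · by_cases hi0 : i = 0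
            · left; exact hi0
            · right
              have : G i ≤ G i := le_refl _
              exact hc1
          · by_cases hitop : i = (nm1 : ℤ)
            · left; exact hitop
            · right; exact hc2
        rw [hcnt, hv]
      rw [hhead, ← List.map_append, ← PySem.List.pyRange_one_append (G i) (G (i + 1)) m
        (hmono i (i + 1) h0 (by omega) (by omega)) (by rw [← hGn]; exact hmono (i + 1) ((nm1:ℤ)+1) (by omega) (by omega) (by omega))]

-- ---- B's single pass in bucketed form ----
lemma pv_bfold (g0 : List Int) (bnd G : ℤ → ℤ) (c : ℤ) (nm1 : ℕ) (P Q : Int → Int → Int × Int)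
    (hc : c = (nm1 : ℤ))
    (hagree : ∀ k : ℤ, 1 ≤ k → k ≤ (nm1 : ℤ) → bnd k = G k)
    (hmono : ∀ k l : ℤ, 1 ≤ k → k ≤ l → l ≤ (nm1 : ℤ) → G k ≤ G l) :
    ∀ (ws : List Int) (j p : ℤ) (L R : List (Int × Int)),
      0 ≤ p → p ≤ (nm1 : ℤ) → p ≤ pvCnt G nm1 j →
      ∃ pf, (PySem.List.enumerate ws j).foldl (fun st q =>
          (st.1 ++ [P (pvIdx g0 (pvAdv bnd q.1 ((c - st.2.2).toNat) st.2.2)) q.2],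
           st.2.1 ++ [Q (pvIdx g0 (pvAdv bnd q.1 ((c - st.2.2).toNat) st.2.2)) q.2],
           pvAdv bnd q.1 ((c - st.2.2).toNat) st.2.2)) (L, R, p)
        = (L ++ (PySem.List.enumerate ws j).map (fun q => P (pvIdx g0 (pvCnt G nm1 q.1)) q.2),
           R ++ (PySem.List.enumerate ws j).map (fun q => Q (pvIdx g0 (pvCnt G nm1 q.1)) q.2),
           pf) := by
  intro ws
  induction ws with
  | nil =>
      intro j p L R h0 hle hcnt
      exact ⟨p, by simp [PySem.List.enumerate]⟩
  | cons w ws ih =>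
      intro j p L R h0 hle hcnt
      have hadv : pvAdv bnd j ((c - p).toNat) p = pvCnt G nm1 j := by
        rw [hc, pvAdv_spec bnd G nm1 j hagree hmono _ p h0 hle rfl, max_eq_right hcnt]
      have hcnt0 : 0 ≤ pvCnt G nm1 j := pvCnt_nonneg G nm1 j
      have hcntle : pvCnt G nm1 j ≤ (nm1 : ℤ) := pvCnt_le G nm1 j
      have hcnt' : pvCnt G nm1 j ≤ pvCnt G nm1 (j + 1) := pvCnt_mono G nm1 (by omega)
      obtain ⟨pf, hrec⟩ := ih (j + 1) (pvCnt G nm1 j)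
        (L ++ [P (pvIdx g0 (pvCnt G nm1 j)) w]) (R ++ [Q (pvIdx g0 (pvCnt G nm1 j)) w])
        hcnt0 hcntle hcnt'
      refine ⟨pf, ?_⟩
      rw [PySem.List.enumerate_cons, List.foldl_cons]
      simp only [hadv]
      rw [hrec]
      simp [List.append_assoc]

-- ---- the whole equivalence for a fixed choice of (g0, g1, rev) ----
lemma pv_main (g0 g1 : List Int) (rev : Bool) (hn : g0 ≠ [])
    (hpre : ((g0.length : ℕ) : ℤ) ≤ 1 ∨
      pvTrunc (pvDRound (pvDRound ((((g0.length : ℤ)) - 1 : ℤ) : ℚ) *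
          pvDRound ((g1.length : ℚ) / (g0.length : ℚ))))
        ≤ (g1.length : ℤ)) :
    (let rate := pvDRound ((g1.length : ℚ) / (g0.length : ℚ))
     let res := (PySem.List.enumerate g0).foldl (fun st p =>
        let nj : ℤ := if p.1 = (g0.length : ℤ) - 1 then (g1.length : ℤ)
                      else pvTrunc (pvDRound (pvDRound ((p.1 : ℚ) + 1) * rate))
        (st.1 ++ (PySem.List.pyRange st.2.2 nj 1).map
            (fun cj => if !rev then (p.2, pvIdx g1 cj) else (pvIdx g1 cj, p.2)),
         st.2.1 ++ (PySem.List.pyRange st.2.2 nj 1).map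
            (fun cj => if rev then (p.2, pvIdx g1 cj) else (pvIdx g1 cj, p.2)),
         nj)) (([] : List (Int × Int)), ([] : List (Int × Int)), (0 : ℤ))
     (res.1, res.2.1))
    = (let n : ℤ := (g0.length : ℤ)
       let rate := pvDRound ((g1.length : ℚ) / (g0.length : ℚ))
       let res := (PySem.List.enumerate g1).foldl (fun st q =>
          let p := pvAdv (fun k => pvTrunc (pvDRound (pvDRound (k : ℚ) * rate))) q.1
                     ((n - 1 - st.2.2).toNat) st.2.2
          let v := pvIdx g0 p
          (st.1 ++ [if rev then (q.2, v) else (v, q.2)],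
           st.2.1 ++ [if rev then (v, q.2) else (q.2, v)],
           p)) (([] : List (Int × Int)), ([] : List (Int × Int)), (0 : ℤ))
       (res.1, res.2.1)) := by
  have hn1 : 0 < g0.length := List.length_pos_of_ne_nil hn
  show ((List.foldl (fun st (p : ℤ × Int) =>
      (st.1 ++ (PySem.List.pyRange st.2.2 (if p.1 = (g0.length : ℤ) - 1 then (g1.length : ℤ)
            else pvTrunc (pvDRound (pvDRound ((p.1 : ℚ) + 1) * pvDRound ((g1.length : ℚ) / (g0.length : ℚ))))) 1).map
          (fun cj => if !rev then (p.2, pvIdx g1 cj) else (pvIdx g1 cj, p.2)),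
       st.2.1 ++ (PySem.List.pyRange st.2.2 (if p.1 = (g0.length : ℤ) - 1 then (g1.length : ℤ)
            else pvTrunc (pvDRound (pvDRound ((p.1 : ℚ) + 1) * pvDRound ((g1.length : ℚ) / (g0.length : ℚ))))) 1).map
          (fun cj => if rev then (p.2, pvIdx g1 cj) else (pvIdx g1 cj, p.2)),
       if p.1 = (g0.length : ℤ) - 1 then (g1.length : ℤ)
            else pvTrunc (pvDRound (pvDRound ((p.1 : ℚ) + 1) * pvDRound ((g1.length : ℚ) / (g0.length : ℚ))))))
      (([] : List (Int × Int)), ([] : List (Int × Int)), (0 : ℤ)) (PySem.List.enumerate g0)).1,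
     (List.foldl (fun st (p : ℤ × Int) =>
      (st.1 ++ (PySem.List.pyRange st.2.2 (if p.1 = (g0.length : ℤ) - 1 then (g1.length : ℤ)
            else pvTrunc (pvDRound (pvDRound ((p.1 : ℚ) + 1) * pvDRound ((g1.length : ℚ) / (g0.length : ℚ))))) 1).map
          (fun cj => if !rev then (p.2, pvIdx g1 cj) else (pvIdx g1 cj, p.2)),
       st.2.1 ++ (PySem.List.pyRange st.2.2 (if p.1 = (g0.length : ℤ) - 1 then (g1.length : ℤ)
            else pvTrunc (pvDRound (pvDRound ((p.1 : ℚ) + 1) * pvDRound ((g1.length : ℚ) / (g0.length : ℚ))))) 1).map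
          (fun cj => if rev then (p.2, pvIdx g1 cj) else (pvIdx g1 cj, p.2)),
       if p.1 = (g0.length : ℤ) - 1 then (g1.length : ℤ)
            else pvTrunc (pvDRound (pvDRound ((p.1 : ℚ) + 1) * pvDRound ((g1.length : ℚ) / (g0.length : ℚ))))))
      (([] : List (Int × Int)), ([] : List (Int × Int)), (0 : ℤ)) (PySem.List.enumerate g0)).2.1)
    = ((List.foldl (fun st (q : ℤ × Int) =>
      (st.1 ++ [if rev then (q.2, pvIdx g0 (pvAdv (fun k => pvTrunc (pvDRound (pvDRound (k : ℚ) * pvDRound ((g1.length : ℚ) / (g0.length : ℚ))))) q.1 (((g0.length : ℤ) - 1 - st.2.2).toNat) st.2.2))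
                 else (pvIdx g0 (pvAdv (fun k => pvTrunc (pvDRound (pvDRound (k : ℚ) * pvDRound ((g1.length : ℚ) / (g0.length : ℚ))))) q.1 (((g0.length : ℤ) - 1 - st.2.2).toNat) st.2.2), q.2)],
       st.2.1 ++ [if rev then (pvIdx g0 (pvAdv (fun k => pvTrunc (pvDRound (pvDRound (k : ℚ) * pvDRound ((g1.length : ℚ) / (g0.length : ℚ))))) q.1 (((g0.length : ℤ) - 1 - st.2.2).toNat) st.2.2), q.2)
                 else (q.2, pvIdx g0 (pvAdv (fun k => pvTrunc (pvDRound (pvDRound (k : ℚ) * pvDRound ((g1.length : ℚ) / (g0.length : ℚ))))) q.1 (((g0.length : ℤ) - 1 - st.2.2).toNat) st.2.2))],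
       pvAdv (fun k => pvTrunc (pvDRound (pvDRound (k : ℚ) * pvDRound ((g1.length : ℚ) / (g0.length : ℚ))))) q.1 (((g0.length : ℤ) - 1 - st.2.2).toNat) st.2.2))
      (([] : List (Int × Int)), ([] : List (Int × Int)), (0 : ℤ)) (PySem.List.enumerate g1)).1,
      (List.foldl (fun st (q : ℤ × Int) =>
      (st.1 ++ [if rev then (q.2, pvIdx g0 (pvAdv (fun k => pvTrunc (pvDRound (pvDRound (k : ℚ) * pvDRound ((g1.length : ℚ) / (g0.length : ℚ))))) q.1 (((g0.length : ℤ) - 1 - st.2.2).toNat) st.2.2))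
                 else (pvIdx g0 (pvAdv (fun k => pvTrunc (pvDRound (pvDRound (k : ℚ) * pvDRound ((g1.length : ℚ) / (g0.length : ℚ))))) q.1 (((g0.length : ℤ) - 1 - st.2.2).toNat) st.2.2), q.2)],
       st.2.1 ++ [if rev then (pvIdx g0 (pvAdv (fun k => pvTrunc (pvDRound (pvDRound (k : ℚ) * pvDRound ((g1.length : ℚ) / (g0.length : ℚ))))) q.1 (((g0.length : ℤ) - 1 - st.2.2).toNat) st.2.2), q.2)
                 else (q.2, pvIdx g0 (pvAdv (fun k => pvTrunc (pvDRound (pvDRound (k : ℚ) * pvDRound ((g1.length : ℚ) / (g0.length : ℚ))))) q.1 (((g0.length : ℤ) - 1 - st.2.2).toNat) st.2.2))],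
       pvAdv (fun k => pvTrunc (pvDRound (pvDRound (k : ℚ) * pvDRound ((g1.length : ℚ) / (g0.length : ℚ))))) q.1 (((g0.length : ℤ) - 1 - st.2.2).toNat) st.2.2))
      (([] : List (Int × Int)), ([] : List (Int × Int)), (0 : ℤ)) (PySem.List.enumerate g1)).2.1)
  set rate := pvDRound ((g1.length : ℚ) / (g0.length : ℚ)) with hrate
  set F : ℤ → ℤ := fun i => if i = (g0.length : ℤ) - 1 then (g1.length : ℤ)
      else pvTrunc (pvDRound (pvDRound ((i : ℚ) + 1) * rate)) with hF
  set bnd : ℤ → ℤ := fun k => pvTrunc (pvDRound (pvDRound (k : ℚ) * rate)) with hbnd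
  have hr : (0:ℚ) ≤ rate :=
    pvDRound_nonneg (div_nonneg (Nat.cast_nonneg _) (Nat.cast_nonneg _))
  set nm1 : ℕ := g0.length - 1 with hnm1
  set G : ℤ → ℤ := pvG rate (g0.length : ℤ) (g1.length : ℤ) with hGdef
  have hlast' : (g0.length : ℤ) ≤ 1 ∨ pvB rate ((g0.length : ℤ) - 1) ≤ (g1.length : ℤ) := by
    unfold pvB
    exact hpre
  have hmonoG : ∀ k l : ℤ, 0 ≤ k → k ≤ l → l ≤ (nm1 : ℤ) + 1 → G k ≤ G l := by
    intro k l h0 h hl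
    exact pvG_mono hr (by omega) (by omega) hlast' h0 h (by omega)
  have hmono' : ∀ k l : ℤ, 1 ≤ k → k ≤ l → l ≤ (nm1 : ℤ) → G k ≤ G l :=
    fun k l a b c => hmonoG k l (by omega) b (by omega)
  have hagree : ∀ k : ℤ, 1 ≤ k → k ≤ (nm1 : ℤ) → bnd k = G k := by
    intro k hk1 hk2
    simp only [hbnd, hGdef]
    unfold pvG pvB
    rw [if_neg (by omega), if_pos (by omega)]
  have hFG : ∀ i : ℤ, 0 ≤ i → i ≤ (nm1 : ℤ) → F i = G (i + 1) := by
    intro i h0 hi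
    simp only [hF, hGdef]
    by_cases hc : i = (g0.length : ℤ) - 1
    · rw [if_pos hc]
      unfold pvG
      rw [if_neg (by omega), if_neg (by omega)]
    · rw [if_neg hc]
      unfold pvG pvB
      rw [if_neg (by omega), if_pos (by omega)]
      rw [show ((i + 1 : ℤ) : ℚ) = (i : ℚ) + 1 by push_cast; ring]
  have hGn : G ((nm1 : ℤ) + 1) = (g1.length : ℤ) := by
    rw [hGdef]; unfold pvG
    rw [if_neg (by omega), if_neg (by omega)]
  have hG0 : G 0 = 0 := by
    rw [hGdef]; unfold pvG
    rw [if_pos le_rfl]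
  -- A side: fold → chunks → bucketed range map
  have hfold := pv_fold_spec F
      (fun v c => if !rev then (v, pvIdx g1 c) else (pvIdx g1 c, v))
      (fun v c => if rev then (v, pvIdx g1 c) else (pvIdx g1 c, v))
      g0 0 0 [] []
  have hchunks := pv_chunks_eq g0 F G (g1.length : ℤ) nm1 hFG hmonoG hmono' hGn g0 0 le_rfl
      (by omega) (by simp)
  rw [hG0] at hchunks
  -- B side: fold → bucketed enumerate map
  obtain ⟨pf, hbf⟩ := pv_bfold g0 bnd G ((g0.length : ℤ) - 1) nm1
      (fun v w => if rev then (w, v) else (v, w))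
      (fun v w => if rev then (v, w) else (w, v))
      (by omega) hagree hmono' g1 0 0 [] [] le_rfl (by omega) (pvCnt_nonneg G nm1 0)
  rw [hfold, hbf, hchunks]
  simp only [List.nil_append, List.map_map]
  rw [PySem.List.enumerate_eq_map_pyRange g1 (0 : Int), List.map_map, List.map_map,
    PySem.List.len_eq]
  cases rev <;> rfl

-- ===== VERDICT (by name: the statement is the Claim_ definition above) =====
theorem linkingLists_oneall2manyall_spec : Claim_equal_linkingLists_oneall2manyall := by
  intro l1 l2 _hdom hpre
  obtain ⟨h1, h2, h3⟩ := hpre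
  show linkingLists_oneall2manyall l1 l2 = linkingLists_oneall2manyall_alt l1 l2
  unfold linkingLists_oneall2manyall linkingLists_oneall2manyall_alt
  by_cases hc : l1.length < l2.length
  · rw [Nat.min_eq_left hc.le, Nat.max_eq_right hc.le] at h3
    simp only [if_pos hc, decide_eq_true hc, Bool.not_true]
    exact pv_main l1 l2 false h1 h3
  · have hc' : l2.length ≤ l1.length := by omega
    rw [Nat.min_eq_right hc', Nat.max_eq_left hc'] at h3
    simp only [if_neg hc, decide_eq_false hc, Bool.not_false]
    exact pv_main l2 l1 true h2 h3
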